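-- pv_equiv track=rewrite | github.com/bayur-yuliya/anagrams | anagrams.py | function_reverse_word
-- ===== SOURCE A (Python) =====
-- def function_reverse_word(word):
--     # the function iterates over the letters in a word and reverses them
--     reverse_letter_list = []
--     non_letter_list = []
--
--     for every_letter in word:
--         if every_letter.isalpha():
--             reverse_letter_list.append(every_letter)
--             non_letter_list.append(None)
--         else:
--             non_letter_list.append(every_letter)
--
--     reverse_letter_list = reverse_letter_list[:: -1]
--
--     for element_in_non_letter_list in range(len(word)):
--         if non_letter_list[element_in_non_letter_list] is not None:
--             pass
--         else:
--             non_letter_list[element_in_non_letter_list] = reverse_letter_list[0]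
--             reverse_letter_list.pop(0)
--
--     reversed_word = "".join(non_letter_list)
--
--     return reversed_word
-- ===== SOURCE B (Python) =====
-- def function_reverse_word(word):
--     # Two-pointer in-place swap: reverse the letters, non-letters stay put.
--     chars = list(word)
--     left, right = 0, len(chars) - 1
--     while left < right:
--         if not chars[left].isalpha():
--             left += 1
--         elif not chars[right].isalpha():
--             right -= 1
--         else:
--             chars[left], chars[right] = chars[right], chars[left]
--             left += 1
--             right -= 1
--     return "".join(chars)
-- ===== Notes on version B (the rewrite author's own statement) =====
-- stated objective: faster
-- what changed: Replaces A's three passes (collect letters, reverse, refill the None slots via repeated O(n) pop(0) calls) by a single in-place two-pointer sweep that swaps the outermost pair of letters and moves inward.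
import Mathlib
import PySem

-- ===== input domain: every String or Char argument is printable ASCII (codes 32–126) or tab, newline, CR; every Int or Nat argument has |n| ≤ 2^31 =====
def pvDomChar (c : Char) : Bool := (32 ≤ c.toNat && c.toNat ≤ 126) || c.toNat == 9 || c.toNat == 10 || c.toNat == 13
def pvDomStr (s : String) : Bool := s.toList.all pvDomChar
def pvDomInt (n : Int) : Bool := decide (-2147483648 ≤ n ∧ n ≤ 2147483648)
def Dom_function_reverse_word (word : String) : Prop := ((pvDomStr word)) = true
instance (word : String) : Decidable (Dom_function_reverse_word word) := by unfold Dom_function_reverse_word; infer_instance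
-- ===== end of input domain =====

-- B replaces A's three passes (collect letters, reverse, refill the None slots) by one
-- in-place two-pointer sweep that swaps the outermost pair of letters and moves inward.

-- ===== PORT A =====
-- first loop: build reverse_letter_list and non_letter_list (None marks a letter slot)
def pvPass1 (cs : List Char) : List Char × List (Option Char) :=
  cs.foldl (fun (st : List Char × List (Option Char)) c =>
    if PySem.Chars.isalpha c then (st.1 ++ [c], st.2 ++ [none]) else (st.1, st.2 ++ [some c])) ([], [])

-- second loop: 'for i in range(len(word))' visits each slot once, left to right; ported as
-- a front-to-back recursion over the same two lists (None slot: take rl[0], pop(0)).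
-- The 'none, []' case is Python's IndexError on rl.pop(0)/rl[0]; unreachable from pvPass1's output.
def pvFillLoop (nl : List (Option Char)) (rl : List Char) : List Char :=
  match nl, rl with
  | [], _ => []
  | some c :: rest, rl => c :: pvFillLoop rest rl
  | none :: rest, x :: xs => x :: pvFillLoop rest xs
  | none :: rest, [] => pvFillLoop rest []

def function_reverse_word (word : String) : String :=
  let p := pvPass1 word.toList
  -- reverse_letter_list[::-1]
  let rl := p.1.reverse
  String.mk (pvFillLoop p.2 rl)

-- ===== PORT B =====
def pvTpLoop (cs : List Char) (l r : Int) : List Char :=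
  if _h : l < r then
    if ¬ PySem.Chars.isalpha (cs.getD l.toNat ' ') then pvTpLoop cs (l + 1) r
    else if ¬ PySem.Chars.isalpha (cs.getD r.toNat ' ') then pvTpLoop cs l (r - 1)
    else pvTpLoop ((cs.set l.toNat (cs.getD r.toNat ' ')).set r.toNat (cs.getD l.toNat ' '))
          (l + 1) (r - 1)
  else cs
termination_by (r - l).toNat
decreasing_by all_goals omega

def function_reverse_word_alt (word : String) : String :=
  String.mk (pvTpLoop word.toList 0 ((word.toList.length : Int) - 1))

-- ===== PRECONDITION & SPEC =====
def Spec_function_reverse_word (word : String) (out : String) : Prop := out = function_reverse_word_alt word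
instance (word : String) (out : String) : Decidable (Spec_function_reverse_word word out) := by unfold Spec_function_reverse_word; infer_instance

-- ===== CLAIM (what is proved, stated in full; the proofs are below) =====
def Claim_equal_function_reverse_word : Prop := ∀ (word : String), Dom_function_reverse_word word → Spec_function_reverse_word word (function_reverse_word word)

-- ===== LEMMAS AND PROOFS =====

-- 'fill cs ls' : cs with its letter positions replaced by successive elements of ls
def pvFill : List Char → List Char → List Char
  | [], _ => []
  | c :: cs, ls =>
    if PySem.Chars.isalpha c then
      match ls with
      | [] => pvFill cs []
      | x :: xs => x :: pvFill cs xs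
    else c :: pvFill cs ls

def pvTarget (cs : List Char) : List Char :=
  pvFill cs ((cs.filter PySem.Chars.isalpha).reverse)

def pvMask (c : Char) : Option Char := if PySem.Chars.isalpha c then none else some c

theorem pvFill_nil (ls : List Char) : pvFill [] ls = [] := rfl

theorem pvFill_cons_alpha (c : Char) (cs x' : List Char) (x : Char) (xs : List Char)
    (hc : PySem.Chars.isalpha c = true) (hls : x' = x :: xs) :
    pvFill (c :: cs) x' = x :: pvFill cs xs := by subst hls; simp [pvFill, hc]

theorem pvFill_cons_alpha_nil (c : Char) (cs : List Char)
    (hc : PySem.Chars.isalpha c = true) :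
    pvFill (c :: cs) [] = pvFill cs [] := by simp [pvFill, hc]

theorem pvFill_cons_nonalpha (c : Char) (cs ls : List Char)
    (hc : PySem.Chars.isalpha c = false) :
    pvFill (c :: cs) ls = c :: pvFill cs ls := by simp [pvFill, hc]

theorem pvPass1_eq (cs : List Char) (rl : List Char) (nl : List (Option Char)) :
    cs.foldl (fun (st : List Char × List (Option Char)) c =>
      if PySem.Chars.isalpha c then (st.1 ++ [c], st.2 ++ [none]) else (st.1, st.2 ++ [some c]))
      (rl, nl)
    = (rl ++ cs.filter PySem.Chars.isalpha, nl ++ cs.map pvMask) := by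
  induction cs generalizing rl nl with
  | nil => simp
  | cons c cs ih =>
    by_cases h : PySem.Chars.isalpha c = true <;>
      simp [h, List.filter_cons, pvMask, ih]

theorem pvFillLoop_map (cs : List Char) (ls : List Char) :
    pvFillLoop (cs.map pvMask) ls = pvFill cs ls := by
  induction cs generalizing ls with
  | nil => simp [pvFillLoop, pvFill_nil]
  | cons c cs ih =>
    by_cases h : PySem.Chars.isalpha c = true
    · cases ls with
      | nil => rw [pvFill_cons_alpha_nil c cs h]; simp [pvMask, h, pvFillLoop, ih]
      | cons x xs => rw [pvFill_cons_alpha c cs _ x xs h rfl]; simp [pvMask, h, pvFillLoop, ih]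
    · rw [pvFill_cons_nonalpha c cs ls (by simp [h])]
      simp [pvMask, h, pvFillLoop, ih]

theorem functionA_eq_target (word : String) :
    function_reverse_word word = String.mk (pvTarget word.toList) := by
  have h := pvPass1_eq word.toList [] []
  simp only [function_reverse_word, pvPass1, h, List.nil_append]
  rw [pvFillLoop_map, pvTarget]

theorem pvFill_append (cs cs' ls : List Char) :
    pvFill (cs ++ cs') ls = pvFill cs ls ++ pvFill cs' (ls.drop (cs.countP PySem.Chars.isalpha)) := by
  induction cs generalizing ls with
  | nil => simp [pvFill_nil]
  | cons c cs ih =>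
    by_cases h : PySem.Chars.isalpha c = true
    · cases ls with
      | nil =>
        rw [List.cons_append, pvFill_cons_alpha_nil c (cs ++ cs') h, pvFill_cons_alpha_nil c cs h, ih]
        simp
      | cons x xs =>
        rw [List.cons_append, pvFill_cons_alpha c (cs ++ cs') _ x xs h rfl,
          pvFill_cons_alpha c cs _ x xs h rfl, ih]
        simp [List.countP_cons, h]
    · rw [List.cons_append, pvFill_cons_nonalpha c (cs ++ cs') ls (by simp [h]),
        pvFill_cons_nonalpha c cs ls (by simp [h]), ih]
      simp [List.countP_cons, h]

theorem pvFill_extra (cs ls extra : List Char) (h : cs.countP PySem.Chars.isalpha ≤ ls.length) :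
    pvFill cs (ls ++ extra) = pvFill cs ls := by
  induction cs generalizing ls with
  | nil => simp [pvFill_nil]
  | cons c cs ih =>
    by_cases hc : PySem.Chars.isalpha c = true
    · cases ls with
      | nil => simp [List.countP_cons, hc] at h
      | cons x xs =>
        have h2 : List.countP PySem.Chars.isalpha cs ≤ xs.length := by
          rw [List.countP_cons] at h; simp [hc] at h; omega
        rw [List.cons_append, pvFill_cons_alpha c cs _ x (xs ++ extra) hc rfl,
          pvFill_cons_alpha c cs _ x xs hc rfl, ih xs h2]
    · have h2 : List.countP PySem.Chars.isalpha cs ≤ ls.length := by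
        rw [List.countP_cons] at h; simp [hc] at h; omega
      rw [pvFill_cons_nonalpha c cs _ (by simp [hc]),
        pvFill_cons_nonalpha c cs _ (by simp [hc]), ih ls h2]

theorem pvTarget_cons_nonalpha (c : Char) (cs : List Char) (h : PySem.Chars.isalpha c = false) :
    pvTarget (c :: cs) = c :: pvTarget cs := by
  rw [pvTarget, pvTarget, List.filter_cons, h, pvFill_cons_nonalpha c cs _ h]
  simp

theorem pvTarget_concat_nonalpha (cs : List Char) (d : Char) (h : PySem.Chars.isalpha d = false) :
    pvTarget (cs ++ [d]) = pvTarget cs ++ [d] := by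
  have hf : (cs ++ [d]).filter PySem.Chars.isalpha = cs.filter PySem.Chars.isalpha := by
    simp [List.filter_append, List.filter_cons, h]
  rw [pvTarget, pvTarget, hf, pvFill_append]
  rw [pvFill_cons_nonalpha d [] _ h, pvFill_nil]

theorem pvTarget_both_alpha (c d : Char) (m : List Char)
    (hc : PySem.Chars.isalpha c = true) (hd : PySem.Chars.isalpha d = true) :
    pvTarget (c :: (m ++ [d])) = d :: (pvTarget m ++ [c]) := by
  have hlen : (m.filter PySem.Chars.isalpha).reverse.length = m.countP PySem.Chars.isalpha := by
    simp [List.countP_eq_length_filter]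
  have hf : ((c :: (m ++ [d])).filter PySem.Chars.isalpha).reverse
      = d :: ((m.filter PySem.Chars.isalpha).reverse ++ [c]) := by
    simp [List.filter_cons, hc, hd, List.filter_append]
  rw [pvTarget, hf, pvFill_cons_alpha c (m ++ [d]) _ d _ hc rfl, pvFill_append]
  have hdrop : (((m.filter PySem.Chars.isalpha).reverse ++ [c]).drop (m.countP PySem.Chars.isalpha)) = [c] := by
    rw [List.drop_append_of_le_length (by omega)]
    simp [hlen]
  rw [hdrop, pvFill_extra _ _ _ (by omega)]
  rw [pvFill_cons_alpha d [] _ c [] hd rfl, pvFill_nil, pvTarget]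

theorem pvGetD_append_cons (pre : List Char) (x : Char) (rest : List Char) (d : Char) :
    (pre ++ x :: rest).getD pre.length d = x := by
  induction pre with
  | nil => rfl
  | cons p ps ih => simpa using ih

theorem pvSet_append_cons (pre : List Char) (x y : Char) (rest : List Char) :
    (pre ++ x :: rest).set pre.length y = pre ++ y :: rest := by
  induction pre with
  | nil => rfl
  | cons p ps ih => simpa using ih

theorem pvTpLoop_spec (n : Nat) :
    ∀ (mid pre suf : List Char), mid.length = n →
      pvTpLoop (pre ++ mid ++ suf) (pre.length : Int) ((pre.length : Int) + mid.length - 1)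
        = pre ++ pvTarget mid ++ suf := by
  induction n using Nat.strong_induction_on with
  | _ n IH =>
  intro mid pre suf hn
  match mid, hn with
  | [], _ =>
    rw [pvTpLoop]
    rw [dif_neg (by simp)]
    simp [pvTarget, pvFill_nil]
  | [c], _ =>
    have htnil : pvTarget [] = [] := by rw [pvTarget]; simp [pvFill_nil]
    have hf : pvTarget [c] = [c] := by
      by_cases h : PySem.Chars.isalpha c = true
      · have hflt : (([c] : List Char).filter PySem.Chars.isalpha).reverse = [c] := by
          simp [List.filter_cons, h]
        rw [pvTarget, hflt, pvFill_cons_alpha c [] _ c [] h rfl, pvFill_nil]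
      · rw [pvTarget_cons_nonalpha c [] (by simp [h]), htnil]
    rw [pvTpLoop, dif_neg (by simp), hf]
  | c :: c' :: cs, hn =>
    rcases List.eq_nil_or_concat (c' :: cs) with h | ⟨m, d, hmd⟩
    · exact absurd h (by simp)
    simp only [List.concat_eq_append] at hmd
    rw [hmd] at hn ⊢
    have hn' : m.length + 2 = n := by simpa using hn
    have hmidlen : (c :: (m ++ [d])).length = m.length + 2 := by simp
    have hl : ((pre.length : Int)).toNat = pre.length := by omega
    have hlt : (pre.length : Int) < (pre.length : Int) + (c :: (m ++ [d])).length - 1 := by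
      rw [hmidlen]; push_cast; omega
    have hgetl : (pre ++ (c :: (m ++ [d])) ++ suf).getD ((pre.length : Int)).toNat ' ' = c := by
      rw [hl]
      simpa using pvGetD_append_cons pre c ((m ++ [d]) ++ suf) ' '
    have hr : (((pre.length : Int) + (c :: (m ++ [d])).length - 1)).toNat
        = (pre ++ c :: m).length := by
      rw [hmidlen]; simp; push_cast; omega
    have hgetr : (pre ++ (c :: (m ++ [d])) ++ suf).getD
        (((pre.length : Int) + (c :: (m ++ [d])).length - 1)).toNat ' ' = d := by
      rw [hr]
      have : pre ++ (c :: (m ++ [d])) ++ suf = (pre ++ c :: m) ++ d :: suf := by simp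
      rw [this]
      exact pvGetD_append_cons _ d suf ' '
    rw [pvTpLoop, dif_pos hlt, hgetl, hgetr]
    by_cases hc : PySem.Chars.isalpha c = true
    · by_cases hd : PySem.Chars.isalpha d = true
      · -- both letters: swap and recurse on the interior
        rw [if_neg (by simp [hc]), if_neg (by simp [hd])]
        have hset : ((pre ++ (c :: (m ++ [d])) ++ suf).set ((pre.length : Int)).toNat d).set
            (((pre.length : Int) + (c :: (m ++ [d])).length - 1)).toNat c
            = (pre ++ [d]) ++ m ++ (c :: suf) := by
          rw [hl, hr]
          have h1 : pre ++ (c :: (m ++ [d])) ++ suf = pre ++ c :: ((m ++ [d]) ++ suf) := by simp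
          rw [h1, pvSet_append_cons]
          have h2 : pre ++ d :: (m ++ [d] ++ suf) = (pre ++ d :: m) ++ d :: suf := by simp
          rw [h2]
          have h3 : (pre ++ c :: m).length = (pre ++ d :: m).length := by simp
          rw [h3, pvSet_append_cons]
          simp
        rw [hset]
        have hIH := IH m.length (by omega) m (pre ++ [d]) (c :: suf) rfl
        have harg : ((pre ++ [d]).length : Int) = (pre.length : Int) + 1 := by simp
        have harg2 : (((pre ++ [d]).length : Int)) + (m.length : Int) - 1
            = (pre.length : Int) + ((c :: (m ++ [d])).length : Int) - 1 - 1 := by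
          rw [hmidlen]; push_cast; simp; omega
        rw [harg2, harg] at hIH
        rw [hIH, pvTarget_both_alpha c d m hc hd]
        simp
      · -- right end is not a letter: step right pointer inward
        rw [if_neg (by simp [hc]), if_pos (by simp [hd])]
        have h1 : pre ++ (c :: (m ++ [d])) ++ suf = pre ++ (c :: m) ++ (d :: suf) := by simp
        rw [h1]
        have hIH := IH (c :: m).length (by simp; omega) (c :: m) pre (d :: suf) rfl
        have harg : (pre.length : Int) + ((c :: m).length : Int) - 1
            = (pre.length : Int) + ((c :: (m ++ [d])).length : Int) - 1 - 1 := by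
          push_cast; simp; omega
        rw [harg] at hIH
        have ht := pvTarget_concat_nonalpha (c :: m) d (by simpa using hd)
        rw [List.cons_append] at ht
        rw [hIH, ht]
        simp
    · -- left end is not a letter: step left pointer inward
      rw [if_pos (by simp [hc])]
      have h1 : pre ++ (c :: (m ++ [d])) ++ suf = (pre ++ [c]) ++ (m ++ [d]) ++ suf := by simp
      rw [h1]
      have hIH := IH (m ++ [d]).length (by simp; omega) (m ++ [d]) (pre ++ [c]) suf rfl
      have harg : ((pre ++ [c]).length : Int) + ((m ++ [d]).length : Int) - 1
          = (pre.length : Int) + ((c :: (m ++ [d])).length : Int) - 1 := by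
        push_cast; simp; omega
      have hargl : (((pre ++ [c]).length : Nat) : Int) = (pre.length : Int) + 1 := by simp
      rw [harg, hargl] at hIH
      rw [hIH, pvTarget_cons_nonalpha c (m ++ [d]) (by simpa using hc)]
      simp

theorem functionB_eq_target (word : String) :
    function_reverse_word_alt word = String.mk (pvTarget word.toList) := by
  have h := pvTpLoop_spec word.toList.length word.toList [] [] rfl
  simp only [List.nil_append, List.append_nil, List.length_nil, Nat.cast_zero, zero_add] at h
  rw [function_reverse_word_alt, h]

-- ===== VERDICT (by name: the statement is the Claim_ definition above) =====
theorem function_reverse_word_spec : Claim_equal_function_reverse_word := by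
  intro word _
  unfold Spec_function_reverse_word
  rw [functionA_eq_target, functionB_eq_target]
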